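-- pv_equiv track=rewrite | github.com/a-meynard/adventofcode | day6.py | find_starter
-- ===== SOURCE A (Python) =====
-- STARTER_PACKET_SIZE = 14
--
-- def find_starter(line):
--     for i in range(len(line)):
--         found = False
--         encoutered_char = set()
--         for c in line[i : i + STARTER_PACKET_SIZE]:
--             if c in encoutered_char:
--                 found = True
--             encoutered_char.add(c)
--         if found:
--             continue
--         return i + STARTER_PACKET_SIZE
-- ===== SOURCE B (Python) =====
-- STARTER_PACKET_SIZE = 14
--
-- def find_starter(line):
--     # incremental sliding window: counts of chars in line[i : i+14], dups = number of
--     # "excess" (duplicated) characters in the window; dups == 0 iff window all distinct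
--     counts = {}
--     dups = 0
--     for c in line[:STARTER_PACKET_SIZE]:
--         k = counts.get(c, 0)
--         if k > 0:
--             dups += 1
--         counts[c] = k + 1
--     for i in range(len(line)):
--         if dups == 0:
--             return i + STARTER_PACKET_SIZE
--         c = line[i]
--         k = counts[c]
--         if k > 1:
--             dups -= 1
--         counts[c] = k - 1
--         r = i + STARTER_PACKET_SIZE
--         if r < len(line):
--             d = line[r]
--             m = counts.get(d, 0)
--             if m > 0:
--                 dups += 1
--             counts[d] = m + 1
--     return None
-- ===== Notes on version B (the rewrite author's own statement) =====
-- stated objective: faster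
-- what changed: A rebuilds a fresh set over each 14-char slice for every index (per-index rescan); B maintains one incremental sliding window with a character-count dict and a duplicate counter updated in O(1) per step.
import Mathlib
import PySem

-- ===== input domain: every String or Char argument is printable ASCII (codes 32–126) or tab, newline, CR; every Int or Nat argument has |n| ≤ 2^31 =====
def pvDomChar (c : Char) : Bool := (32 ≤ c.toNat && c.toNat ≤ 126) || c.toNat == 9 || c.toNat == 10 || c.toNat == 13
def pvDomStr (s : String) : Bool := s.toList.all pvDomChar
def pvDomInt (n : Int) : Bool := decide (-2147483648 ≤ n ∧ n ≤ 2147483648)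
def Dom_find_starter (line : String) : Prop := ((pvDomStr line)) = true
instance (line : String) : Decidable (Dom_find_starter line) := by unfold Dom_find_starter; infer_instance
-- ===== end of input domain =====

-- B replaces A's per-index rebuild of a duplicate set (O(n·w)) with one incremental
-- sliding window keeping character counts and a duplicate counter (objective: faster, constant window update).


-- ===== PORT A =====
-- inner 'for c in line[i : i + STARTER_PACKET_SIZE]' with the 'found' flag and the set
def findDupLoop : List Char → Bool → PySem.Set Char → Bool
  | [], found, _ => found
  | c :: cs, found, enc =>
      findDupLoop cs (if PySem.Set.contains enc c then true else found) (PySem.Set.add enc c)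

-- outer 'for i in range(len(line))' with early return
def findLoopA (cs : List Char) : List Int → Option Int
  | [] => none
  | i :: rest =>
      if findDupLoop (PySem.List.slice cs (some i) (some (i + 14))) false PySem.Set.empty then
        findLoopA cs rest
      else some (i + 14)

def find_starter (line : String) : Option Int :=
  findLoopA line.toList (PySem.List.pyRange 0 (line.toList.length : Int) 1)

-- ===== PORT B =====
-- add one char to the window state (counts, dups)
def bAdd (st : PySem.Dict Char Int × Int) (c : Char) : PySem.Dict Char Int × Int :=
  let k := st.1.getD c 0
  (st.1.insert c (k + 1), if k > 0 then st.2 + 1 else st.2)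

-- remove one char from the window state; the key is present (c is in the window), so getD c 0 is counts[c]
def bDel (st : PySem.Dict Char Int × Int) (c : Char) : PySem.Dict Char Int × Int :=
  let k := st.1.getD c 0
  (st.1.insert c (k - 1), if k > 1 then st.2 - 1 else st.2)

-- 'for i in range(len(line))': check dups, slide the window one step
def findLoopB (cs : List Char) : List Nat → PySem.Dict Char Int × Int → Option Int
  | [], _ => none
  | i :: rest, st =>
      if st.2 == 0 then some ((i : Int) + 14)
      else
        let st1 := bDel st (cs.getD i ' ')
        let st2 := match cs[i + 14]? with
                   | some d => bAdd st1 d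
                   | none => st1
        findLoopB cs rest st2

def find_starter_alt (line : String) : Option Int :=
  findLoopB line.toList (List.range line.toList.length)
    ((line.toList.take 14).foldl bAdd (PySem.Dict.empty, 0))

-- ===== PRECONDITION & SPEC =====
def Spec_find_starter (line : String) (out : Option Int) : Prop := out = find_starter_alt line
instance (line : String) (out : Option Int) : Decidable (Spec_find_starter line out) := by unfold Spec_find_starter; infer_instance

-- ===== CLAIM (what is proved, stated in full; the proofs are below) =====
def Claim_equal_find_starter : Prop := ∀ (line : String), Dom_find_starter line → Spec_find_starter line (find_starter line)

-- ===== LEMMAS AND PROOFS =====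

-- number of duplicated positions in a list (length minus number of distinct chars)
def excess : List Char → Nat
  | [] => 0
  | c :: w => excess w + (if c ∈ w then 1 else 0)

theorem excess_eq_zero_iff (w : List Char) : excess w = 0 ↔ w.Nodup := by
  induction w with
  | nil => simp [excess]
  | cons c w ih =>
      by_cases h : c ∈ w <;> simp [excess, h, ih]

theorem excess_append_singleton (w : List Char) (d : Char) :
    excess (w ++ [d]) = excess w + (if d ∈ w then 1 else 0) := by
  induction w with
  | nil => simp [excess]
  | cons c w ih =>
      simp only [List.cons_append, excess, ih, List.mem_append, List.mem_cons]
      by_cases hcd : c = d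
      · subst hcd
        by_cases h : c ∈ w <;> simp [h]
      · by_cases h1 : c ∈ w <;> by_cases h2 : d ∈ w <;>
          simp [h1, h2, hcd, Ne.symm hcd]

-- the invariant tying B's state to the current window
def WInv (st : PySem.Dict Char Int × Int) (w : List Char) : Prop :=
  (∀ c : Char, st.1.getD c 0 = (w.count c : Int)) ∧ st.2 = (excess w : Int)

theorem Inv_bAdd {st : PySem.Dict Char Int × Int} {w : List Char} (h : WInv st w) (d : Char) :
    WInv (bAdd st d) (w ++ [d]) := by
  obtain ⟨hc, hd⟩ := h
  constructor
  · intro c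
    by_cases hcd : c = d
    · subst hcd
      simp [bAdd, hc, List.count_append]
    · simp [bAdd, PySem.Dict.getD_insert, hcd, Ne.symm hcd, hc, List.count_append]
  · have hcnt : st.1.getD d 0 = (w.count d : Int) := hc d
    simp only [bAdd, hd, hcnt, excess_append_singleton]
    by_cases hm : d ∈ w
    · have h1 : (0 : Int) < (w.count d : Int) := by
        exact_mod_cast List.count_pos_iff.mpr hm
      simp only [if_pos h1, if_pos hm]
      push_cast
      ring
    · have h1 : ¬ (0 : Int) < ((w.count d : Nat) : Int) := by
        rw [List.count_eq_zero.mpr hm]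
        omega
      simp [hm]

theorem Inv_bDel {st : PySem.Dict Char Int × Int} {c : Char} {w : List Char}
    (h : WInv st (c :: w)) : WInv (bDel st c) w := by
  obtain ⟨hc, hd⟩ := h
  constructor
  · intro c'
    by_cases hcc : c' = c
    · subst hcc
      simp only [bDel, PySem.Dict.getD_insert, hc, List.count_cons_self]
      push_cast
      ring_nf
    · have hcount : List.count c' (c :: w) = List.count c' w := by
        simp [Ne.symm hcc]
      simp only [bDel, PySem.Dict.getD_insert, if_neg hcc, hc, hcount]
  · have hcnt : st.1.getD c 0 = (((c :: w).count c : Nat) : Int) := hc c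
    have hco : (c :: w).count c = w.count c + 1 := List.count_cons_self
    simp only [bDel, hd, hcnt, excess, hco]
    by_cases hm : c ∈ w
    · have hpos : 0 < w.count c := List.count_pos_iff.mpr hm
      simp only [if_pos hm]
      split_ifs with hgt
      · push_cast
        ring
      · exfalso
        apply hgt
        push_cast
        omega
    · have h0 : w.count c = 0 := List.count_eq_zero.mpr hm
      simp only [if_neg hm, h0]
      split_ifs with hgt
      · simp at hgt
      · push_cast
        ring

theorem Inv_foldl_bAdd : ∀ (w ws : List Char) (st : PySem.Dict Char Int × Int),
    WInv st ws → WInv (w.foldl bAdd st) (ws ++ w) := by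
  intro w
  induction w with
  | nil => intro ws st h; simpa using h
  | cons c w ih =>
      intro ws st h
      have := ih (ws ++ [c]) (bAdd st c) (Inv_bAdd h c)
      simpa [List.append_assoc] using this

theorem Inv_init (cs : List Char) :
    WInv ((cs.take 14).foldl bAdd (PySem.Dict.empty, 0)) (cs.take 14) := by
  have h0 : WInv (PySem.Dict.empty, 0) ([] : List Char) := by
    constructor
    · intro c; simp [PySem.Dict.getD_empty]
    · simp [excess]
  simpa using Inv_foldl_bAdd (cs.take 14) [] _ h0

-- A's inner loop returns false iff the flag is down, the window has no duplicate and avoids the set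
theorem findDupLoop_false_iff : ∀ (w : List Char) (found : Bool) (enc : PySem.Set Char),
    findDupLoop w found enc = false ↔
      (found = false ∧ w.Nodup ∧ ∀ c ∈ w, c ∉ enc) := by
  intro w
  induction w with
  | nil => intro found enc; simp [findDupLoop]
  | cons c cs ih =>
      intro found enc
      rw [findDupLoop, ih]
      have hcb : (PySem.Set.contains enc c = true) ↔ c ∈ enc := List.contains_iff_mem
      constructor
      · rintro ⟨h1, h2, h3⟩
        by_cases hm : PySem.Set.contains enc c = true
        · rw [if_pos hm] at h1
          exact absurd h1 (by simp)
        · rw [if_neg hm] at h1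
          have hcen : c ∉ enc := fun h => hm (hcb.mpr h)
          have hccs : c ∉ cs := fun h => (h3 c h) ((PySem.Set.mem_add _ _ _).mpr (Or.inr rfl))
          refine ⟨h1, List.nodup_cons.mpr ⟨hccs, h2⟩, ?_⟩
          intro x hx
          rcases List.mem_cons.mp hx with rfl | hx'
          · exact hcen
          · exact fun hxe => (h3 x hx') ((PySem.Set.mem_add _ _ _).mpr (Or.inl hxe))
      · rintro ⟨h1, h2, h3⟩
        have hcen : c ∉ enc := h3 c List.mem_cons_self
        have hm : ¬ PySem.Set.contains enc c = true := fun h => hcen (hcb.mp h)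
        obtain ⟨hnc, hnd⟩ := List.nodup_cons.mp h2
        refine ⟨by rw [if_neg hm]; exact h1, hnd, ?_⟩
        intro x hx hxa
        rcases (PySem.Set.mem_add _ _ _).mp hxa with hxe | rfl
        · exact (h3 x (List.mem_cons_of_mem _ hx)) hxe
        · exact hnc hx

theorem findDupLoop_start (w : List Char) :
    findDupLoop w false PySem.Set.empty = false ↔ w.Nodup := by
  rw [findDupLoop_false_iff]
  simp [PySem.Set.empty]

-- window shape lemmas
theorem window_cons (cs : List Char) (i : Nat) (h : i < cs.length) :
    (cs.drop i).take 14 = cs.getD i ' ' :: ((cs.drop (i + 1)).take 13) := by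
  rw [List.drop_eq_getElem_cons h, List.getD_eq_getElem _ _ h]
  rfl

theorem window_succ (cs : List Char) (i : Nat) :
    (cs.drop (i + 1)).take 14 = ((cs.drop (i + 1)).take 13) ++ (cs[i + 14]?).toList := by
  have h13 : (cs.drop (i + 1))[13]? = cs[i + 14]? := by
    rw [List.getElem?_drop]
  rw [show (14 : Nat) = 13 + 1 from rfl, List.take_add_one, h13]

-- the joint induction: A's remaining loop equals B's remaining loop given the invariant
theorem loops_eq (cs : List Char) : ∀ (k i : Nat) (st : PySem.Dict Char Int × Int),
    i + k = cs.length → WInv st ((cs.drop i).take 14) →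
    findLoopA cs (PySem.List.pyRange (i : Int) (cs.length : Int) 1) = findLoopB cs (List.range' i k) st := by
  intro k
  induction k with
  | zero =>
      intro i st hlen _
      have hnil : PySem.List.pyRange (i : Int) (cs.length : Int) 1 = [] := by
        have := PySem.List.length_pyRange_one (i : Int) (cs.length : Int)
        apply List.eq_nil_of_length_eq_zero
        omega
      rw [hnil]
      simp [findLoopA, findLoopB]
  | succ k ih =>
      intro i st hlen hinv
      have hi : i < cs.length := by omega
      have hii : (i : Int) < (cs.length : Int) := by exact_mod_cast hi
      rw [PySem.List.pyRange_one_cons hii, List.range'_succ]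
      rw [findLoopA, findLoopB]
      have hslice : PySem.List.slice cs (some (i : Int)) (some ((i : Int) + 14)) = (cs.drop i).take 14 := by
        have h := PySem.List.slice_natCast_add cs i 14
        have h14 : ((14 : Nat) : Int) = (14 : Int) := by norm_num
        rw [h14] at h
        exact h
      have hdup : (findDupLoop (PySem.List.slice cs (some (i : Int)) (some ((i : Int) + 14))) false PySem.Set.empty = false)
          ↔ ((cs.drop i).take 14).Nodup := by
        rw [hslice, findDupLoop_start]
      have hz : (st.2 == 0) = true ↔ ((cs.drop i).take 14).Nodup := by
        rw [beq_iff_eq, hinv.2]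
        constructor
        · intro h
          exact (excess_eq_zero_iff _).mp (by exact_mod_cast h)
        · intro h
          exact_mod_cast congrArg (Nat.cast : Nat → Int) ((excess_eq_zero_iff _).mpr h)
      by_cases hnd : ((cs.drop i).take 14).Nodup
      · have h1 : findDupLoop (PySem.List.slice cs (some (i : Int)) (some ((i : Int) + 14))) false PySem.Set.empty = false := hdup.mpr hnd
        rw [h1, if_neg (by simp), if_pos (hz.mpr hnd)]
      · have h1 : findDupLoop (PySem.List.slice cs (some (i : Int)) (some ((i : Int) + 14))) false PySem.Set.empty = true := by
          cases hb : findDupLoop (PySem.List.slice cs (some (i : Int)) (some ((i : Int) + 14))) false PySem.Set.empty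
          · exact absurd (hdup.mp hb) hnd
          · rfl
        have h2 : ¬ (st.2 == 0) = true := fun h => hnd (hz.mp h)
        rw [h1, if_pos rfl, if_neg h2]
        have hwin : (cs.drop i).take 14 = cs.getD i ' ' :: ((cs.drop (i + 1)).take 13) := window_cons cs i hi
        have hinv1 : WInv (bDel st (cs.getD i ' ')) ((cs.drop (i + 1)).take 13) :=
          Inv_bDel (by rwa [hwin] at hinv)
        have hinv2 : WInv (match cs[i + 14]? with
                          | some d => bAdd (bDel st (cs.getD i ' ')) d
                          | none => bDel st (cs.getD i ' ')) ((cs.drop (i + 1)).take 14) := by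
          rw [window_succ]
          cases hg : cs[i + 14]? with
          | none => simpa using hinv1
          | some d => simpa using Inv_bAdd hinv1 d
        have hrec := ih (i + 1) _ (by omega) hinv2
        have hcast : ((i : Int) + 1) = (((i + 1 : Nat)) : Int) := by push_cast; ring
        rw [hcast]
        exact hrec

-- ===== VERDICT (by name: the statement is the Claim_ definition above) =====
theorem find_starter_spec : Claim_equal_find_starter := by
  intro line _
  unfold Spec_find_starter find_starter find_starter_alt
  rw [List.range_eq_range']
  have h := loops_eq line.toList line.toList.length 0 _ (by omega) (Inv_init line.toList)
  simpa using h
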